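-- pv_equiv track=rewrite | github.com/TakisAngelides/ml_with_tn | learning_pytorch/tci.py | decimal_to_fixed_dinary
-- ===== SOURCE A (Python) =====
-- def decimal_to_fixed_dinary(n: int, d: int, N: int):
--
--     if d < 2:
--         raise ValueError("Base d must be at least 2.")
--     if n < 0:
--         raise ValueError("Decimal number must be non-negative.")
--
--     result = [0] * N
--     i = N - 1  # Python uses 0-based indexing
--
--     while n > 0 and i >= 0:
--         result[i] = n % d
--         n //= d
--         i -= 1
--
--     if n > 0:
--         raise ValueError(f"Number too large to fit in {N} digits for base {d}.")
--
--     return result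
-- ===== SOURCE B (Python) =====
-- def _split(n, d, N):
--     # divide and conquer: the N-digit base-d representation of n is the
--     # (N - N//2)-digit block of n // d**(N//2) followed by the
--     # N//2-digit block of n % d**(N//2); a zero block is all zeros
--     if N == 0:
--         return []
--     if n == 0:
--         return [0] * N
--     if N == 1:
--         return [n]
--     h = N // 2
--     hi, lo = divmod(n, d ** h)
--     return _split(hi, d, N - h) + _split(lo, d, h)
--
--
-- def decimal_to_fixed_dinary(n: int, d: int, N: int):
--     if d < 2:
--         raise ValueError("Base d must be at least 2.")
--     if n < 0:
--         raise ValueError("Decimal number must be non-negative.")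
--     if n >= d ** max(N, 0):
--         raise ValueError(f"Number too large to fit in {N} digits for base {d}.")
--     return _split(n, d, max(N, 0))
-- ===== Notes on version B (the rewrite author's own statement) =====
-- stated objective: alternative
-- what changed: Replaces A's stateful right-to-left while loop (repeatedly taking n % d and shrinking n by floor division, detecting overflow from leftover loop state) by an upfront overflow test n >= d**max(N,0) followed by a recursive divide-and-conquer radix split: divmod by d**(N//2) splits the number into high and low halves converted independently and concatenated, with a zero block emitted directly as zeros.
import Mathlib
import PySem

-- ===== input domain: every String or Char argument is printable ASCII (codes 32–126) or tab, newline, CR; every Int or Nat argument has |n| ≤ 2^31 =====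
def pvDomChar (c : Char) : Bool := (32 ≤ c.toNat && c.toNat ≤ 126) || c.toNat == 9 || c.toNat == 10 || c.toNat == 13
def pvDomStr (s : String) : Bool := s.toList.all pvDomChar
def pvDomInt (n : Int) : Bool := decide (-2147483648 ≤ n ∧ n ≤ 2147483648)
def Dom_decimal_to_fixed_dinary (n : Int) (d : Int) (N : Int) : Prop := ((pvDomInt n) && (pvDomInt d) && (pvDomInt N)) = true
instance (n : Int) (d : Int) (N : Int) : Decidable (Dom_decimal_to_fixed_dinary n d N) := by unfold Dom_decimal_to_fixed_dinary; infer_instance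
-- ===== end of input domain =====

-- B replaces A's stateful right-to-left mod/div while loop by an upfront overflow test
-- and a recursive divide-and-conquer radix split (halve the digit count via divmod by
-- d**(N//2)); alternative algorithm, return value only.

-- ===== PORT A =====
-- the while loop of A: state (result, n, i); fuel bounds the iteration count (≤ N steps,
-- since i decreases from N-1 and the loop requires i ≥ 0)
def pvAloop (d : Int) : Nat → List Int → Int → Int → List Int × Int
  | 0, res, n, _ => (res, n)
  | fuel+1, res, n, i =>
    if n > 0 ∧ i ≥ 0 then
      pvAloop d fuel (res.set i.toNat (PySem.Int.mod n d)) (PySem.Int.floordiv n d) (i-1)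
    else (res, n)

-- the three 'raise ValueError' branches return [] here; Pre_ excludes exactly those inputs
def decimal_to_fixed_dinary (n : Int) (d : Int) (N : Int) : List Int :=
  if d < 2 then []
  else if n < 0 then []
  else
    let res := List.replicate N.toNat 0      -- [0] * N  ([] for N ≤ 0)
    let p := pvAloop d N.toNat res n (N - 1)
    if p.2 > 0 then [] else p.1

-- ===== PORT B =====
-- _split of Source B: divmod(n, d**h) = (n // d**h, n % d**h); the Nat digit count N is
-- max(N,0).toNat at the call site, matching Python's nonneg recursion argument
def pvSplit (d : Int) (N : Nat) (n : Int) : List Int :=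
  if N = 0 then []
  else if n = 0 then List.replicate N 0
  else if N = 1 then [n]
  else pvSplit d (N - N / 2) (PySem.Int.floordiv n (d ^ (N / 2)))
       ++ pvSplit d (N / 2) (PySem.Int.mod n (d ^ (N / 2)))
  termination_by N
  decreasing_by all_goals omega

-- the 'raise ValueError' branches return [] here; Pre_ excludes exactly those inputs.
-- Python's d ** max(N,0) has a nonnegative exponent, so the Nat exponent is exact.
def decimal_to_fixed_dinary_alt (n : Int) (d : Int) (N : Int) : List Int :=
  if d < 2 then []
  else if n < 0 then []
  else if n ≥ d ^ (max N 0).toNat then []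
  else pvSplit d (max N 0).toNat n

-- ===== PRECONDITION & SPEC =====
-- Pre_ = exactly the inputs where A returns normally: valid base, non-negative n, n fits in N digits
def Pre_decimal_to_fixed_dinary (n : Int) (d : Int) (N : Int) : Prop :=
  2 ≤ d ∧ 0 ≤ n ∧ n < d ^ (max N 0).toNat
instance (n : Int) (d : Int) (N : Int) : Decidable (Pre_decimal_to_fixed_dinary n d N) := by
  unfold Pre_decimal_to_fixed_dinary; infer_instance

def pvWitness_decimal_to_fixed_dinary : Int × Int × Int := (13, 2, 5)

def Spec_decimal_to_fixed_dinary (n : Int) (d : Int) (N : Int) (out : List Int) : Prop := out = decimal_to_fixed_dinary_alt n d N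
instance (n : Int) (d : Int) (N : Int) (out : List Int) : Decidable (Spec_decimal_to_fixed_dinary n d N out) := by unfold Spec_decimal_to_fixed_dinary; infer_instance

-- ===== CLAIM =====
def Claim_equal_decimal_to_fixed_dinary : Prop := ∀ (n : Int) (d : Int) (N : Int), Dom_decimal_to_fixed_dinary n d N → Pre_decimal_to_fixed_dinary n d N → Spec_decimal_to_fixed_dinary n d N (decimal_to_fixed_dinary n d N)

-- ===== LEMMAS AND PROOFS =====

lemma set_replicate_append (i : Nat) (x : Int) (tail : List Int) :
    (List.replicate (i+1) 0 ++ tail).set i x = List.replicate i 0 ++ (x :: tail) := by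
  induction i with
  | zero => simp
  | succ k ih =>
    rw [show List.replicate (k+1+1) 0 ++ tail = 0 :: (List.replicate (k+1) 0 ++ tail) by
          simp [List.replicate_succ]]
    rw [List.set_cons_succ, ih]
    simp [List.replicate_succ]

lemma digit_zero (d : Int) (hd : 2 ≤ d) (e : Nat) :
    PySem.Int.mod (PySem.Int.floordiv 0 (d ^ e)) d = 0 := by
  rw [show PySem.Int.floordiv 0 (d ^ e) = 0 / d ^ e from
        PySem.Int.floordiv_eq_ediv_of_pos (by positivity),
      PySem.Int.mod_eq_emod_of_pos (by omega)]
  simp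

lemma floordiv_zero_pow (d : Int) (hd : 2 ≤ d) (e : Nat) :
    PySem.Int.floordiv 0 (d ^ e) = 0 := by
  rw [show PySem.Int.floordiv 0 (d ^ e) = 0 / d ^ e from
        PySem.Int.floordiv_eq_ediv_of_pos (by positivity)]
  simp

lemma map_digits_zero (d : Int) (hd : 2 ≤ d) (m : Nat) (g : Nat → Nat) :
    (List.range m).map (fun j => PySem.Int.mod (PySem.Int.floordiv 0 (d ^ g j)) d)
      = List.replicate m 0 := by
  simp [digit_zero d hd]

lemma floordiv_comp (d : Int) (hd : 2 ≤ d) (n : Int) (e : Nat) :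
    PySem.Int.floordiv (PySem.Int.floordiv n d) (d ^ e) = PySem.Int.floordiv n (d ^ (e+1)) := by
  rw [show PySem.Int.floordiv n d = n / d from PySem.Int.floordiv_eq_ediv_of_pos (by omega),
      show PySem.Int.floordiv (n / d) (d ^ e) = n / d / d ^ e from
        PySem.Int.floordiv_eq_ediv_of_pos (by positivity),
      show PySem.Int.floordiv n (d ^ (e+1)) = n / d ^ (e+1) from
        PySem.Int.floordiv_eq_ediv_of_pos (by positivity),
      Int.ediv_ediv_of_nonneg (by omega : (0:Int) ≤ d), pow_succ']

lemma loopA (d : Int) (hd : 2 ≤ d) : ∀ (i : Nat) (n : Int) (tail : List Int), 0 ≤ n →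
    pvAloop d (i+1) (List.replicate (i+1) 0 ++ tail) n (i : Int)
      = ((List.range (i+1)).map (fun j => PySem.Int.mod (PySem.Int.floordiv n (d ^ (i - j))) d) ++ tail,
         PySem.Int.floordiv n (d ^ (i+1))) := by
  intro i
  induction i with
  | zero =>
    intro n tail hn
    by_cases hpos : n > 0
    · simp only [pvAloop]
      rw [if_pos ⟨hpos, by omega⟩]
      simp only [Int.toNat_natCast, set_replicate_append 0]
      rw [Prod.mk.injEq]
      refine ⟨by simp [List.range_succ], ?_⟩
      rw [show PySem.Int.floordiv n (d ^ (0+1)) = n / d ^ (0+1) from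
            PySem.Int.floordiv_eq_ediv_of_pos (by positivity),
          show PySem.Int.floordiv n d = n / d from PySem.Int.floordiv_eq_ediv_of_pos (by omega)]
      rw [pow_one]
    · have hn0 : n = 0 := by omega
      subst hn0
      simp only [pvAloop]
      rw [if_neg (by omega)]
      rw [Prod.mk.injEq]
      exact ⟨by rw [map_digits_zero d hd], by rw [floordiv_zero_pow d hd]⟩
  | succ k ih =>
    intro n tail hn
    by_cases hpos : n > 0
    · have hstep : pvAloop d (k+1+1) (List.replicate (k+1+1) 0 ++ tail) n ((k+1 : Nat) : Int)
          = pvAloop d (k+1) (List.replicate (k+1) 0 ++ (PySem.Int.mod n d :: tail))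
              (PySem.Int.floordiv n d) ((k : Nat) : Int) := by
        simp only [pvAloop]
        rw [if_pos ⟨hpos, by positivity⟩]
        have h1 : ((k+1 : Nat) : Int).toNat = k+1 := by simp
        have h2 : ((k+1 : Nat) : Int) - 1 = ((k : Nat) : Int) := by push_cast; ring
        rw [h1, h2, set_replicate_append (k+1)]
      have hq : 0 ≤ PySem.Int.floordiv n d := by
        rw [show PySem.Int.floordiv n d = n / d from PySem.Int.floordiv_eq_ediv_of_pos (by omega)]
        exact Int.ediv_nonneg hn (by omega)
      rw [hstep, ih _ _ hq]
      rw [Prod.mk.injEq]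
      constructor
      · have h1 : (List.range (k+1)).map
              (fun j => PySem.Int.mod (PySem.Int.floordiv (PySem.Int.floordiv n d) (d ^ (k - j))) d)
            = (List.range (k+1)).map
              (fun j => PySem.Int.mod (PySem.Int.floordiv n (d ^ (k + 1 - j))) d) := by
          apply List.map_congr_left
          intro j hj
          have hj' : j < k + 1 := List.mem_range.mp hj
          rw [floordiv_comp d hd n (k - j)]
          have he : k - j + 1 = k + 1 - j := by omega
          rw [he]
        have h2 : (List.range (k+1+1)).map
              (fun j => PySem.Int.mod (PySem.Int.floordiv n (d ^ (k + 1 - j))) d)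
            = (List.range (k+1)).map
                (fun j => PySem.Int.mod (PySem.Int.floordiv n (d ^ (k + 1 - j))) d)
              ++ [PySem.Int.mod n d] := by
          rw [List.range_succ, List.map_append]
          simp
        rw [h1, h2]
        simp
      · rw [floordiv_comp d hd n (k+1)]
    · have hn0 : n = 0 := by omega
      subst hn0
      simp only [pvAloop]
      rw [if_neg (by omega)]
      rw [Prod.mk.injEq]
      exact ⟨by rw [map_digits_zero d hd], by rw [floordiv_zero_pow d hd]⟩

lemma floordiv_pow_add (d : Int) (hd : 2 ≤ d) (n : Int) (a b : Nat) :
    PySem.Int.floordiv (PySem.Int.floordiv n (d ^ a)) (d ^ b) = PySem.Int.floordiv n (d ^ (a+b)) := by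
  rw [show PySem.Int.floordiv n (d ^ a) = n / d ^ a from PySem.Int.floordiv_eq_ediv_of_pos (by positivity),
      show PySem.Int.floordiv (n / d ^ a) (d ^ b) = n / d ^ a / d ^ b from
        PySem.Int.floordiv_eq_ediv_of_pos (by positivity),
      show PySem.Int.floordiv n (d ^ (a+b)) = n / d ^ (a+b) from
        PySem.Int.floordiv_eq_ediv_of_pos (by positivity),
      Int.ediv_ediv_of_nonneg (by positivity : (0:Int) ≤ d ^ a), pow_add]

-- the digit at a position below h depends only on n % d^h
lemma digit_mod_pow (d : Int) (hd : 2 ≤ d) (n : Int) (hn : 0 ≤ n) (h e : Nat) (he : e < h) :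
    PySem.Int.mod (PySem.Int.floordiv (n % d ^ h) (d ^ e)) d
      = PySem.Int.mod (PySem.Int.floordiv n (d ^ e)) d := by
  have hpe : (0:Int) < d ^ e := by positivity
  rw [show PySem.Int.floordiv (n % d ^ h) (d ^ e) = (n % d ^ h) / d ^ e from
        PySem.Int.floordiv_eq_ediv_of_pos hpe,
      show PySem.Int.floordiv n (d ^ e) = n / d ^ e from PySem.Int.floordiv_eq_ediv_of_pos hpe,
      PySem.Int.mod_eq_emod_of_pos (by omega), PySem.Int.mod_eq_emod_of_pos (by omega)]
  obtain ⟨f, hf⟩ : ∃ f : Nat, h - e = f + 1 := ⟨h - e - 1, by omega⟩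
  have hpow : d ^ h = d ^ (f + 1) * d ^ e := by rw [← pow_add]; congr 1; omega
  have hsplit : n = d ^ h * (n / d ^ h) + n % d ^ h := (Int.ediv_add_emod n (d ^ h)).symm
  have h1 : d ^ h * (n / d ^ h) = n / d ^ h * d ^ f * d * d ^ e := by
    rw [hpow, pow_succ]; ring
  have h2 : n = n % d ^ h + n / d ^ h * d ^ f * d * d ^ e := by linarith [hsplit, h1]
  have key : n / d ^ e = (n % d ^ h) / d ^ e + n / d ^ h * d ^ f * d := by
    conv_lhs => rw [h2]
    rw [Int.add_mul_ediv_right _ _ (by omega : d ^ e ≠ 0)]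
  rw [key, Int.add_mul_emod_self_right]

lemma pvSplit_spec (d : Int) (hd : 2 ≤ d) : ∀ (N : Nat) (n : Int), 0 ≤ n → n < d ^ N →
    pvSplit d N n = (List.range N).map
      (fun j => PySem.Int.mod (PySem.Int.floordiv n (d ^ (N - 1 - j))) d) := by
  intro N
  induction N using Nat.strong_induction_on with
  | _ N ih =>
    intro n hn hlt
    by_cases hn0 : n = 0
    · subst hn0
      rw [pvSplit]
      by_cases hN0 : N = 0
      · subst hN0; simp
      · rw [if_neg hN0, if_pos rfl]
        exact (map_digits_zero d hd N (fun j => N - 1 - j)).symm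
    match N, ih with
    | 0, _ => exfalso; rw [pow_zero] at hlt; omega
    | 1, _ =>
      rw [pow_one] at hlt
      have h1 : pvSplit d 1 n = [n] := by simp [pvSplit, hn0]
      rw [h1, List.range_one]
      simp only [List.map_cons, List.map_nil]
      congr 1
      rw [show ((1:Nat) - 1 - 0) = 0 by rfl, pow_zero,
          show PySem.Int.floordiv n 1 = n / 1 from PySem.Int.floordiv_eq_ediv_of_pos (by omega),
          PySem.Int.mod_eq_emod_of_pos (by omega), Int.ediv_one, Int.emod_eq_of_lt hn hlt]
    | (m+2), ih =>
      set N := m + 2 with hN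
      have h2 : 2 ≤ N := by omega
      set h := N / 2 with hh
      have hh1 : 1 ≤ h := by omega
      have hhN : h < N := by omega
      set g := N - h with hg
      have hg1 : 1 ≤ g := by omega
      have hgN : g < N := by omega
      have hgh : g + h = N := by omega
      have hph : (0:Int) < d ^ h := by positivity
      rw [pvSplit]
      simp only [if_neg (by omega : ¬ N = 0), if_neg hn0, if_neg (by omega : ¬ N = 1)]
      have hfd : PySem.Int.floordiv n (d ^ h) = n / d ^ h :=
        PySem.Int.floordiv_eq_ediv_of_pos hph
      have hmd : PySem.Int.mod n (d ^ h) = n % d ^ h :=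
        PySem.Int.mod_eq_emod_of_pos (by omega)
      have hhi0 : 0 ≤ n / d ^ h := Int.ediv_nonneg hn (by omega)
      have hhilt : n / d ^ h < d ^ g := by
        rw [Int.ediv_lt_iff_lt_mul hph, ← pow_add, hgh]
        exact hlt
      have hlo0 : 0 ≤ n % d ^ h := Int.emod_nonneg n (by omega)
      have hlolt : n % d ^ h < d ^ h := Int.emod_lt_of_pos n hph
      rw [hfd, hmd, ih g hgN (n / d ^ h) hhi0 hhilt, ih h hhN (n % d ^ h) hlo0 hlolt]
      rw [show List.range N = List.range (g + h) by rw [hgh], List.range_add, List.map_append,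
          List.map_map]
      congr 1
      · apply List.map_congr_left
        intro j hj
        have hj' : j < g := List.mem_range.mp hj
        rw [← hfd, floordiv_pow_add d hd n h (g - 1 - j),
            show h + (g - 1 - j) = N - 1 - j by omega]
      · apply List.map_congr_left
        intro j hj
        have hj' : j < h := List.mem_range.mp hj
        simp only [Function.comp_apply]
        rw [digit_mod_pow d hd n hn h (h - 1 - j) (by omega),
            show (h:Nat) - 1 - j = N - 1 - (g + j) by omega]

-- ===== VERDICT =====
theorem decimal_to_fixed_dinary_spec : Claim_equal_decimal_to_fixed_dinary := by
  intro n d N _ hpre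
  obtain ⟨hd, hn, hlt⟩ := hpre
  unfold Spec_decimal_to_fixed_dinary decimal_to_fixed_dinary decimal_to_fixed_dinary_alt
  simp only [if_neg (show ¬ d < 2 by omega), if_neg (show ¬ n < 0 by omega),
             if_neg (show ¬ n ≥ d ^ (max N 0).toNat by omega)]
  rw [pvSplit_spec d hd (max N 0).toNat n hn hlt]
  by_cases hN : N ≤ 0
  · have h0 : N.toNat = 0 := by omega
    have hmax : (max N 0).toNat = 0 := by omega
    have hn0 : n = 0 := by rw [hmax, pow_zero] at hlt; omega
    subst hn0
    simp [h0, hmax, pvAloop]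
  · rw [not_le] at hN
    obtain ⟨k, hk⟩ : ∃ k : Nat, N.toNat = k + 1 := ⟨N.toNat - 1, by omega⟩
    have hmax : (max N 0).toNat = k + 1 := by omega
    rw [hmax] at hlt
    have hNi : N - 1 = ((k : Nat) : Int) := by omega
    rw [hk, hNi, hmax]
    have hloop := loopA d hd k n [] hn
    rw [List.append_nil] at hloop
    rw [hloop]
    dsimp only
    have hz : PySem.Int.floordiv n (d ^ (k+1)) = 0 := by
      rw [show PySem.Int.floordiv n (d ^ (k+1)) = n / d ^ (k+1) from
            PySem.Int.floordiv_eq_ediv_of_pos (by positivity)]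
      exact Int.ediv_eq_zero_of_lt hn hlt
    rw [hz, if_neg (by omega), List.append_nil]
    apply List.map_congr_left
    intro j hj
    have hj' : j < k + 1 := List.mem_range.mp hj
    have he : k + 1 - 1 - j = k - j := by omega
    rw [he]
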